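-- pv_equiv track=rewrite | github.com/SANJAIB2004/DSA_python | Practice/insert_0-afterktimes1's.py | func
-- ===== SOURCE A (Python) =====
-- def func(lst,k):
--     res = []
--     count = 0
--     for num in lst:
--         res.append(num)
--         if num == 1:
--             count +=1
--             if count == k:
--                 res.append(0)
--                 count = 0
--         else:
--             count =0
--     return res
-- ===== SOURCE B (Python) =====
-- def func(lst, k):
--     res = []
--     i, n = 0, len(lst)
--     while i < n:
--         x = lst[i]
--         if x == 1 and k > 0:
--             j = i
--             while j < n and lst[j] == 1:
--                 j += 1
--             g, r = divmod(j - i, k)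
--             if g:
--                 res += ([1] * k + [0]) * g
--             res += [1] * r
--             i = j
--         else:
--             res.append(x)
--             i += 1
--     return res
-- ===== Notes on version B (the rewrite author's own statement) =====
-- stated objective: alternative
-- what changed: B scans maximal runs of consecutive 1's and emits each run block-wise with division (L//k full blocks of k ones plus a 0, then L%k leftover ones), instead of A's element-by-element counter that is incremented and reset.
import Mathlib
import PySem

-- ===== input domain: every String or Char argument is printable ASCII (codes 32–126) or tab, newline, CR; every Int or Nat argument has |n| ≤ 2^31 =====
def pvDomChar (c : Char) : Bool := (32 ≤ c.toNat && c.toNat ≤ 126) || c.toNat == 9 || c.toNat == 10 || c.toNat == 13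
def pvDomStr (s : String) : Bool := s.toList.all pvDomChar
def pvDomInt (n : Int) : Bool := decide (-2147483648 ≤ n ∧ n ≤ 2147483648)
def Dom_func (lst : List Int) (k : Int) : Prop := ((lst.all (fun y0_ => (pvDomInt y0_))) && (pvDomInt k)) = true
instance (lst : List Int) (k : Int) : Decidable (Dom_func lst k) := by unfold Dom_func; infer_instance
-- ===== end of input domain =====

-- B replaces A's element-by-element counter by a run-based construction: same output, different decomposition.

-- ===== PORT A =====
-- one iteration of A's for-loop; state = (res, count)
def stepA (k : Int) (st : List Int × Int) (num : Int) : List Int × Int :=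
  let res := st.1 ++ [num]
  if num = 1 then
    let count := st.2 + 1
    if count = k then (res ++ [0], 0) else (res, count)
  else (res, 0)

def func (lst : List Int) (k : Int) : List Int :=
  (lst.foldl (stepA k) ([], 0)).1

-- ===== PORT B =====
-- port of Source B's outer while-loop: each recursive call is one iteration; a run of 1's
-- is consumed at once and emitted as ([1]*k+[0])*(L//k) + [1]*(L%k).
def altGo (k : Int) : List Int → List Int
  | [] => []
  | x :: xs =>
    if h : x = 1 ∧ 0 < k then
      let ones := (x :: xs).takeWhile (fun y => y == 1)
      let L : Int := ones.length
      (List.replicate (PySem.Int.floordiv L k).toNat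
          (List.replicate k.toNat 1 ++ [0])).flatten
        ++ List.replicate (PySem.Int.mod L k).toNat 1
        ++ altGo k ((x :: xs).dropWhile (fun y => y == 1))
    else x :: altGo k xs
termination_by l => l.length
decreasing_by
  · have h2 := List.length_dropWhile_le (fun y => (y == 1)) xs
    rw [List.dropWhile_cons_of_pos (by simp [h.1])]
    simp only [List.length_cons]
    omega
  · simp

def func_alt (lst : List Int) (k : Int) : List Int := altGo k lst

-- ===== PRECONDITION & SPEC =====
def Spec_func (lst : List Int) (k : Int) (out : List Int) : Prop := out = func_alt lst k
instance (lst : List Int) (k : Int) (out : List Int) : Decidable (Spec_func lst k out) := by unfold Spec_func; infer_instance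

-- ===== CLAIM (what is proved, stated in full; the proofs are below) =====
def Claim_equal_func : Prop := ∀ (lst : List Int) (k : Int), Dom_func lst k → Spec_func lst k (func lst k)

-- ===== LEMMAS AND PROOFS =====

-- output of A's loop over a run of L consecutive 1's, entered with counter c
def onesOut (k : Int) : Int → Nat → List Int
  | _, 0 => []
  | c, L + 1 => 1 :: (if c + 1 = k then 0 :: onesOut k 0 L else onesOut k (c + 1) L)

-- A's counter after that run
def cFin (k : Int) : Int → Nat → Int
  | c, 0 => c
  | c, L + 1 => if c + 1 = k then cFin k 0 L else cFin k (c + 1) L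

theorem fold_ones (k : Int) : ∀ (L : Nat) (c : Int) (res : List Int),
    List.foldl (stepA k) (res, c) (List.replicate L 1) = (res ++ onesOut k c L, cFin k c L) := by
  intro L
  induction L with
  | zero => intro c res; simp [onesOut, cFin]
  | succ n ih =>
    intro c res
    simp only [List.replicate_succ, List.foldl_cons, stepA]
    by_cases h : c + 1 = k
    · simp [h, ih, onesOut, cFin]
    · simp [h, ih, onesOut, cFin]

theorem fold_nonpos (k : Int) (hk : k ≤ 0) : ∀ (lst : List Int) (res : List Int) (c : Int),
    0 ≤ c → (List.foldl (stepA k) (res, c) lst).1 = res ++ lst := by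
  intro lst
  induction lst with
  | nil => intro res c _; simp
  | cons x xs ih =>
    intro res c hc
    simp only [List.foldl_cons, stepA]
    by_cases hx : x = 1
    · have hne : ¬ (c + 1 = k) := by omega
      simp only [if_pos hx, if_neg hne]
      rw [ih _ _ (by omega)]
      simp [hx]
    · simp only [if_neg hx]
      rw [ih _ _ (by omega)]
      simp

-- a takeWhile (· == 1) run is a list of 1's
theorem tw_replicate : ∀ (l : List Int),
    l.takeWhile (fun y => y == 1) = List.replicate (l.takeWhile (fun y => y == 1)).length 1 := by
  intro l
  induction l with
  | nil => simp
  | cons x xs ih =>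
    by_cases hx : x = 1
    · simp [hx, List.replicate_succ, ← ih]
    · simp [hx]

-- no 0 inserted while the counter stays below k
theorem onesOut_small (k : Int) : ∀ (L : Nat) (c : Int), (c : Int) + L < k →
    onesOut k c L = List.replicate L 1 := by
  intro L
  induction L with
  | zero => intro c _; simp [onesOut]
  | succ n ih =>
    intro c h
    have hne : ¬ (c + 1 = k) := by push_cast at h; omega
    simp only [onesOut, if_neg hne, List.replicate_succ]
    rw [ih (c + 1) (by push_cast at h ⊢; omega)]

-- a full block: d more 1's reach the counter k, a 0 is emitted, counter resets
theorem onesOut_block (k : Int) : ∀ (d : Nat) (c : Int) (L : Nat), 1 ≤ d → c + d = k → d ≤ L →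
    onesOut k c L = List.replicate d 1 ++ 0 :: onesOut k 0 (L - d) := by
  intro d
  induction d with
  | zero => intro c L h1 _ _; omega
  | succ n ih =>
    intro c L _ hck hdL
    obtain ⟨L', rfl⟩ : ∃ L', L = L' + 1 := ⟨L - 1, by omega⟩
    by_cases hn : n = 0
    · subst hn
      have : c + 1 = k := by push_cast at hck; omega
      simp [onesOut, this]
    · have hne : ¬ (c + 1 = k) := by push_cast at hck; omega
      have hsub : L' + 1 - (n + 1) = L' - n := by omega
      rw [hsub]
      simp only [onesOut, if_neg hne, List.replicate_succ, List.cons_append]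
      rw [ih (c + 1) L' (by omega) (by push_cast at hck ⊢; omega) (by omega)]

-- run-of-1's output in B's block form (kn = k.toNat, 0 < kn)
theorem onesOut_closed (k : Int) (hk : 0 < k) : ∀ (L : Nat),
    onesOut k 0 L = (List.replicate (L / k.toNat) (List.replicate k.toNat 1 ++ [0])).flatten
      ++ List.replicate (L % k.toNat) 1 := by
  intro L
  induction L using Nat.strong_induction_on with
  | _ L ih =>
    by_cases h : L < k.toNat
    · rw [onesOut_small k L 0 (by omega)]
      rw [Nat.div_eq_of_lt h, Nat.mod_eq_of_lt h]
      simp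
    · have hkn : 1 ≤ k.toNat := by omega
      rw [onesOut_block k k.toNat 0 L hkn (by omega) (by omega)]
      rw [ih (L - k.toNat) (by omega)]
      have hdiv : L / k.toNat = (L - k.toNat) / k.toNat + 1 := by
        rw [Nat.div_eq_sub_div (by omega) (by omega)]
      have hmod : L % k.toNat = (L - k.toNat) % k.toNat := by
        conv_lhs => rw [show L = (L - k.toNat) + k.toNat by omega]
        simp [Nat.add_mod_right]
      rw [hdiv, hmod, List.replicate_succ, List.flatten_cons]
      simp

theorem dropWhile_head_false {α : Type} {p : α → Bool} : ∀ (l : List α) (y : α) (ys : List α),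
    l.dropWhile p = y :: ys → p y = false := by
  intro l
  induction l with
  | nil => intro y ys h; simp [List.dropWhile] at h
  | cons x xs ih =>
    intro y ys h
    by_cases hx : p x
    · rw [List.dropWhile_cons_of_pos hx] at h; exact ih y ys h
    · rw [List.dropWhile_cons_of_neg hx] at h
      cases h; simpa using hx

-- main invariant: A's loop from counter 0 computes B's run-based output
theorem main_pos (k : Int) (hk : 0 < k) : ∀ (n : Nat) (lst : List Int), lst.length ≤ n →
    ∀ (res : List Int), (List.foldl (stepA k) (res, 0) lst).1 = res ++ altGo k lst := by
  intro n
  induction n with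
  | zero =>
    intro lst h res
    have : lst = [] := by cases lst <;> simp_all
    subst this; simp [altGo]
  | succ m ih =>
    intro lst hlen res
    cases lst with
    | nil => simp [altGo]
    | cons x xs =>
      by_cases hx : x = 1
      · -- a run of 1's is consumed at once
        rw [altGo, dif_pos ⟨hx, hk⟩]
        have hsplit := List.takeWhile_append_dropWhile (p := fun y => (y == 1)) (l := x :: xs)
        set tw := (x :: xs).takeWhile (fun y => (y == 1)) with htw
        set dw := (x :: xs).dropWhile (fun y => (y == 1)) with hdw
        have hrep : tw = List.replicate tw.length 1 := tw_replicate (x :: xs)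
        have hLpos : 1 ≤ tw.length := by
          rw [htw]; cases hxx : ((x == 1) : Bool)
          · simp [hx] at hxx
          · simp [hxx]
        have hlen2 : tw.length + dw.length = xs.length + 1 := by
          have := congrArg List.length hsplit
          simpa using this
        have hfold : List.foldl (stepA k) (res, 0) (x :: xs)
            = List.foldl (stepA k) (List.foldl (stepA k) (res, 0) tw) dw := by
          conv_lhs => rw [← hsplit]
          rw [List.foldl_append]
        have hones : List.foldl (stepA k) (res, 0) tw
            = (res ++ onesOut k 0 tw.length, cFin k 0 tw.length) := by
          conv_lhs => rw [hrep]
          exact fold_ones k tw.length 0 res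
        have hclosed : onesOut k 0 tw.length
            = (List.replicate (PySem.Int.floordiv (tw.length : Int) k).toNat
                (List.replicate k.toNat 1 ++ [0])).flatten
              ++ List.replicate (PySem.Int.mod (tw.length : Int) k).toNat 1 := by
          have hkk : ((k.toNat : Nat) : Int) = k := by omega
          have htn : ((k.toNat : Nat) : Int).toNat = k.toNat := Int.toNat_natCast _
          have h1 : (PySem.Int.floordiv (tw.length : Int) k).toNat = tw.length / k.toNat := by
            rw [← hkk, PySem.Int.floordiv_natCast, Int.toNat_natCast, htn]
          have h2 : (PySem.Int.mod (tw.length : Int) k).toNat = tw.length % k.toNat := by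
            rw [← hkk, PySem.Int.mod_natCast, Int.toNat_natCast, htn]
          rw [onesOut_closed k hk tw.length, h1, h2]
        cases hdwc : dw with
        | nil =>
          rw [hfold, hones, hdwc]
          simp [altGo, hclosed]
        | cons y ys =>
          have hy : ¬ (y = 1) := by
            have := dropWhile_head_false (p := fun y => (y == 1)) (x :: xs) y ys (by rw [← hdw, hdwc])
            simpa using this
          rw [hfold, hones, hdwc]
          simp only [List.foldl_cons, stepA, if_neg hy]
          have hys : ys.length ≤ m := by
            have hdl : dw.length = ys.length + 1 := by rw [hdwc]; simp
            have hxl : xs.length + 1 ≤ m + 1 := by simpa using hlen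
            omega
          rw [ih ys hys _]
          simp [altGo, hy, hclosed]
      · -- non-1 element passes through
        simp only [List.foldl_cons, stepA, if_neg hx]
        rw [ih xs (by simpa using hlen) _]
        rw [altGo]
        have : ¬ (x = 1 ∧ 0 < k) := fun h => hx h.1
        simp [this]

-- for k ≤ 0, both programs copy the list unchanged
theorem alt_nonpos (k : Int) (hk : k ≤ 0) : ∀ (lst : List Int), altGo k lst = lst := by
  intro lst
  induction lst with
  | nil => simp [altGo]
  | cons x xs ih =>
    rw [altGo]
    have : ¬ (x = 1 ∧ 0 < k) := fun h => by omega
    simp [this, ih]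

-- ===== VERDICT (by name: the statement is the Claim_ definition above) =====
theorem func_spec : Claim_equal_func := by
  intro lst k _
  unfold Spec_func func func_alt
  by_cases hk : 0 < k
  · exact main_pos k hk lst.length lst le_rfl []
  · rw [fold_nonpos k (by omega) lst [] 0 le_rfl, alt_nonpos k (by omega) lst]
    simp
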